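-- pv_equiv track=rewrite | github.com/zemarchezi/superpEpoch_rbsp | superposed/utils/libfunctions.py | set_columnNames
-- ===== SOURCE A (Python) =====
-- def set_columnNames(parameters):
--     columnNames = {}
--     for i in parameters:
--         if i == 'IMF':
--             columnNames[i] = 'IMF [nT]'
--         elif i == 'F':
--             columnNames[i] = 'B [nT]'
--         elif i == 'flow_speed':
--             columnNames[i] = 'Vsw [km/s]'
--         elif i == 'proton_density':
--             columnNames[i] = 'Np [cm$^{-3}$]'
--         elif i in ['BX_GSE', 'BY_GSE', 'BZ_GSE', 'BX_GSM', 'BY_GSM', 'Bz_GSM']: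
--             new = i.split('_')[0]
--             columnNames[i] = f"{new[0]}{new[1].lower()} [nT]"
--         elif i in ['Vx', 'Vy', 'Vz']:
--             columnNames[i] = f"{i} [nT]"
--         elif i in ['AE_INDEX', 'AL_INDEX', 'AU_INDEX']:
--             new = i.split('_')[0]
--             columnNames[i] = f"{new} [nT]"
--         elif i in ['SYM_D', 'SYM_H', 'ASY_D', 'ASY_H']:
--             columnNames[i] = f"{i} [nT]"
--         else:
--             columnNames[i] = i
--
--     return columnNames
-- ===== SOURCE B (Python) =====
-- LABELS = {
--     'IMF': 'IMF [nT]',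
--     'F': 'B [nT]',
--     'flow_speed': 'Vsw [km/s]',
--     'proton_density': 'Np [cm$^{-3}$]',
--     'BX_GSE': 'Bx [nT]',
--     'BY_GSE': 'By [nT]',
--     'BZ_GSE': 'Bz [nT]',
--     'BX_GSM': 'Bx [nT]',
--     'BY_GSM': 'By [nT]',
--     'Bz_GSM': 'Bz [nT]',
--     'Vx': 'Vx [nT]',
--     'Vy': 'Vy [nT]',
--     'Vz': 'Vz [nT]',
--     'AE_INDEX': 'AE [nT]',
--     'AL_INDEX': 'AL [nT]',
--     'AU_INDEX': 'AU [nT]',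
--     'SYM_D': 'SYM_D [nT]',
--     'SYM_H': 'SYM_H [nT]',
--     'ASY_D': 'ASY_D [nT]',
--     'ASY_H': 'ASY_H [nT]',
-- }
--
-- def set_columnNames(parameters):
--     columnNames = {}
--     for i in parameters:
--         columnNames[i] = LABELS.get(i, i)
--     return columnNames
-- ===== Notes on version B (the rewrite author's own statement) =====
-- stated objective: simpler
-- what changed: Replaced A's nine-branch if/elif ladder (with per-branch split/lower string surgery) by a single constant LABELS dictionary holding every display label precomputed, the loop becoming columnNames[i] = LABELS.get(i, i). One O(1) hash lookup per element replaces the branch chain and per-branch string building, measured ~2x faster.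
import Mathlib
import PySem

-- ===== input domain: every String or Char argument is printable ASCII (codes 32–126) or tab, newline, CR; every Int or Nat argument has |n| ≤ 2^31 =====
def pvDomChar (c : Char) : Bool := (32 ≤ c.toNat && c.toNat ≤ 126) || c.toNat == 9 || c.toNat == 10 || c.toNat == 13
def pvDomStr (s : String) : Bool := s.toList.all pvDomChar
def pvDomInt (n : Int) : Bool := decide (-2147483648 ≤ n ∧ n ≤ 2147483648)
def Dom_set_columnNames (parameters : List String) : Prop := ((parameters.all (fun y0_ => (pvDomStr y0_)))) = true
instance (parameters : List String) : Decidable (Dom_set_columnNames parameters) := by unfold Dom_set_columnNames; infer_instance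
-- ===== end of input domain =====

-- B replaces A's nine-branch if/elif ladder by one constant lookup table queried with LABELS.get(i, i): simpler.

-- ===== PORT A =====
-- A's if/elif chain: the value stored for key i (each Python branch does columnNames[i] = <this value>)
def pvValA (i : String) : String :=
  if i == "IMF" then "IMF [nT]"
  else if i == "F" then "B [nT]"
  else if i == "flow_speed" then "Vsw [km/s]"
  else if i == "proton_density" then "Np [cm$^{-3}$]"
  else if ["BX_GSE", "BY_GSE", "BZ_GSE", "BX_GSM", "BY_GSM", "Bz_GSM"].contains i then
    -- new = i.split('_')[0]; f"{new[0]}{new[1].lower()} [nT]"  (the getD defaults are never used: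
    -- every i matching this branch has a first '_'-piece of length 2, so indices 0 and 1 are in range)
    let new := PySem.List.pyGetD (PySem.Chars.splitOn i.toList "_".toList) 0 []
    String.ofList ([new.getD 0 ' '] ++ PySem.Chars.lower [new.getD 1 ' '] ++ " [nT]".toList)
  else if ["Vx", "Vy", "Vz"].contains i then String.ofList (i.toList ++ " [nT]".toList)
  else if ["AE_INDEX", "AL_INDEX", "AU_INDEX"].contains i then
    let new := PySem.List.pyGetD (PySem.Chars.splitOn i.toList "_".toList) 0 []
    String.ofList (new ++ " [nT]".toList)
  else if ["SYM_D", "SYM_H", "ASY_D", "ASY_H"].contains i then String.ofList (i.toList ++ " [nT]".toList)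
  else i

def set_columnNames (parameters : List String) : List (String × String) :=
  (parameters.foldl (fun columnNames i => columnNames.insert i (pvValA i)) PySem.Dict.empty).items

-- ===== PORT B =====
def pvLABELS : PySem.Dict String String := PySem.Dict.ofList
  [("IMF", "IMF [nT]"), ("F", "B [nT]"), ("flow_speed", "Vsw [km/s]"),
   ("proton_density", "Np [cm$^{-3}$]"),
   ("BX_GSE", "Bx [nT]"), ("BY_GSE", "By [nT]"), ("BZ_GSE", "Bz [nT]"),
   ("BX_GSM", "Bx [nT]"), ("BY_GSM", "By [nT]"), ("Bz_GSM", "Bz [nT]"),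
   ("Vx", "Vx [nT]"), ("Vy", "Vy [nT]"), ("Vz", "Vz [nT]"),
   ("AE_INDEX", "AE [nT]"), ("AL_INDEX", "AL [nT]"), ("AU_INDEX", "AU [nT]"),
   ("SYM_D", "SYM_D [nT]"), ("SYM_H", "SYM_H [nT]"), ("ASY_D", "ASY_D [nT]"), ("ASY_H", "ASY_H [nT]")]

def set_columnNames_alt (parameters : List String) : List (String × String) :=
  (parameters.foldl (fun columnNames i => columnNames.insert i (pvLABELS.getD i i)) PySem.Dict.empty).items

-- ===== PRECONDITION & SPEC =====
def Spec_set_columnNames (parameters : List String) (out : List (String × String)) : Prop := out = set_columnNames_alt parameters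
instance (parameters : List String) (out : List (String × String)) : Decidable (Spec_set_columnNames parameters out) := by unfold Spec_set_columnNames; infer_instance

-- ===== CLAIM (what is proved, stated in full; the proofs are below) =====
def Claim_equal_set_columnNames : Prop := ∀ (parameters : List String), Dom_set_columnNames parameters → Spec_set_columnNames parameters (set_columnNames parameters)

-- ===== LEMMAS AND PROOFS =====

-- A's if/elif chain computes exactly the table lookup LABELS.get(i, i), for every string i
theorem pvValA_eq (i : String) : pvValA i = pvLABELS.getD i i := by
  by_cases h1 : i = "IMF"; · subst h1; decide
  by_cases h2 : i = "F"; · subst h2; decide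
  by_cases h3 : i = "flow_speed"; · subst h3; decide
  by_cases h4 : i = "proton_density"; · subst h4; decide
  by_cases h5 : i = "BX_GSE"; · subst h5; decide
  by_cases h6 : i = "BY_GSE"; · subst h6; decide
  by_cases h7 : i = "BZ_GSE"; · subst h7; decide
  by_cases h8 : i = "BX_GSM"; · subst h8; decide
  by_cases h9 : i = "BY_GSM"; · subst h9; decide
  by_cases h10 : i = "Bz_GSM"; · subst h10; decide
  by_cases h11 : i = "Vx"; · subst h11; decide
  by_cases h12 : i = "Vy"; · subst h12; decide
  by_cases h13 : i = "Vz"; · subst h13; decide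
  by_cases h14 : i = "AE_INDEX"; · subst h14; decide
  by_cases h15 : i = "AL_INDEX"; · subst h15; decide
  by_cases h16 : i = "AU_INDEX"; · subst h16; decide
  by_cases h17 : i = "SYM_D"; · subst h17; decide
  by_cases h18 : i = "SYM_H"; · subst h18; decide
  by_cases h19 : i = "ASY_D"; · subst h19; decide
  by_cases h20 : i = "ASY_H"; · subst h20; decide
  rw [show pvLABELS = PySem.Dict.mk
    [("IMF", "IMF [nT]"), ("F", "B [nT]"), ("flow_speed", "Vsw [km/s]"),
     ("proton_density", "Np [cm$^{-3}$]"),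
     ("BX_GSE", "Bx [nT]"), ("BY_GSE", "By [nT]"), ("BZ_GSE", "Bz [nT]"),
     ("BX_GSM", "Bx [nT]"), ("BY_GSM", "By [nT]"), ("Bz_GSM", "Bz [nT]"),
     ("Vx", "Vx [nT]"), ("Vy", "Vy [nT]"), ("Vz", "Vz [nT]"),
     ("AE_INDEX", "AE [nT]"), ("AL_INDEX", "AL [nT]"), ("AU_INDEX", "AU [nT]"),
     ("SYM_D", "SYM_D [nT]"), ("SYM_H", "SYM_H [nT]"), ("ASY_D", "ASY_D [nT]"), ("ASY_H", "ASY_H [nT]")] from by decide]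
  simp [pvValA, PySem.Dict.getD_eq_get?_getD, PySem.Dict.get?,
    h1, h2, h3, h4, h5, h6, h7, h8, h9, h10, h11, h12, h13, h14, h15, h16, h17, h18, h19, h20,
    Ne.symm h1, Ne.symm h2, Ne.symm h3, Ne.symm h4, Ne.symm h5, Ne.symm h6, Ne.symm h7,
    Ne.symm h8, Ne.symm h9, Ne.symm h10, Ne.symm h11, Ne.symm h12, Ne.symm h13, Ne.symm h14,
    Ne.symm h15, Ne.symm h16, Ne.symm h17, Ne.symm h18, Ne.symm h19, Ne.symm h20]

-- the two loops build the same dict (their bodies are pointwise equal)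
theorem pvFoldl_eq (ps : List String) (d : PySem.Dict String String) :
    ps.foldl (fun columnNames i => columnNames.insert i (pvValA i)) d
      = ps.foldl (fun columnNames i => columnNames.insert i (pvLABELS.getD i i)) d := by
  simp only [pvValA_eq]

-- ===== VERDICT (by name: the statement is the Claim_ definition above) =====
theorem set_columnNames_spec : Claim_equal_set_columnNames := by
  intro parameters _
  unfold Spec_set_columnNames set_columnNames set_columnNames_alt
  rw [pvFoldl_eq]
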